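-- pv_equiv track=rewrite | github.com/dasarne/tinythermal-rfcomm | scripts/analyze_payloads.py | contiguous_ranges
-- ===== SOURCE A (Python) =====
-- from typing import Dict, List, Tuple
--
-- def contiguous_ranges(pos: List[int]) -> List[Tuple[int, int]]:
--     if not pos:
--         return []
--     ranges: List[Tuple[int, int]] = []
--     s = pos[0]
--     prev = pos[0]
--     for p in pos[1:]:
--         if p == prev + 1:
--             prev = p
--             continue
--         ranges.append((s, prev))
--         s = p
--         prev = p
--     ranges.append((s, prev))
--     return ranges
-- ===== SOURCE B (Python) =====
-- from itertools import groupby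
-- from typing import List, Tuple
--
-- def contiguous_ranges(pos: List[int]) -> List[Tuple[int, int]]:
--     out: List[Tuple[int, int]] = []
--     for _, grp in groupby(enumerate(pos), key=lambda ix: ix[1] - ix[0]):
--         vals = [v for _, v in grp]
--         out.append((vals[0], vals[-1]))
--     return out
-- ===== Notes on version B (the rewrite author's own statement) =====
-- stated objective: idiomatic
-- what changed: Replaces the explicit start/prev accumulator loop with itertools.groupby over enumerate(pos) keyed by value-minus-index, which is constant exactly across a run of consecutive integers; each group's first and last values give the range.
import Mathlib
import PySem

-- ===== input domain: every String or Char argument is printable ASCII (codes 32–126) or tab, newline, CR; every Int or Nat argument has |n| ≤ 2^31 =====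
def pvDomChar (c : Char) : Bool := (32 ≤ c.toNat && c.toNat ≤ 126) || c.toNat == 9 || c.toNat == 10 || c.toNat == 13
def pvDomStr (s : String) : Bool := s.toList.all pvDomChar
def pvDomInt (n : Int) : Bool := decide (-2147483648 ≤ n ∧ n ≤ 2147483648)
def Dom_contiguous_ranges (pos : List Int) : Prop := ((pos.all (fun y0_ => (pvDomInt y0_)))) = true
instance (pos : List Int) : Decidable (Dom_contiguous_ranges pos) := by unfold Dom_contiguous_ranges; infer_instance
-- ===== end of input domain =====

-- B regroups the positions with groupby keyed by value-minus-index instead of A's start/prev accumulator loop (same cost, more idiomatic).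

-- ===== PORT A =====
def contiguous_ranges (pos : List Int) : List (Int × Int) :=
  match pos with
  | [] => []
  | p0 :: rest =>
    -- state: (ranges, s, prev), exactly A's loop over pos[1:]
    let st := rest.foldl
      (fun (st : List (Int × Int) × Int × Int) p =>
        if p = st.2.2 + 1 then (st.1, st.2.1, p)
        else (st.1 ++ [(st.2.1, st.2.2)], p, p))
      ([], p0, p0)
    st.1 ++ [(st.2.1, st.2.2)]

-- ===== PORT B =====
-- transliteration of itertools.groupby with key k : groups maximal runs of adjacent
-- elements sharing the same key, in order (exact for a finite list input)
def pyGroupBy (k : Int × Int → Int) : List (Int × Int) → List (List (Int × Int))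
  | [] => []
  | x :: xs =>
    match pyGroupBy k xs with
    | [] => [[x]]
    | g :: gs =>
      match g with
      | [] => [x] :: gs
      | y :: t => if k x = k y then (x :: y :: t) :: gs else [x] :: (y :: t) :: gs

def contiguous_ranges_alt (pos : List Int) : List (Int × Int) :=
  (pyGroupBy (fun ix => ix.2 - ix.1) (PySem.List.enumerate pos)).map
    (fun g => let vals := g.map (·.2); (vals.headD 0, vals.getLastD 0))

-- ===== PRECONDITION & SPEC =====
def Spec_contiguous_ranges (pos : List Int) (out : List (Int × Int)) : Prop := out = contiguous_ranges_alt pos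
instance (pos : List Int) (out : List (Int × Int)) : Decidable (Spec_contiguous_ranges pos out) := by unfold Spec_contiguous_ranges; infer_instance

-- ===== CLAIM (what is proved, stated in full; the proofs are below) =====
def Claim_equal_contiguous_ranges : Prop := ∀ (pos : List Int), Dom_contiguous_ranges pos → Spec_contiguous_ranges pos (contiguous_ranges pos)

-- ===== LEMMAS AND PROOFS =====

-- reference recursion both ports are reduced to
def crGo (s prev : Int) : List Int → List (Int × Int)
  | [] => [(s, prev)]
  | p :: ps => if p = prev + 1 then crGo s p ps else (s, prev) :: crGo p p ps

-- A's loop body, named for the proofs (definitionally equal to the lambda in the port)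
def crStep (st : List (Int × Int) × Int × Int) (p : Int) : List (Int × Int) × Int × Int :=
  if p = st.2.2 + 1 then (st.1, st.2.1, p)
  else (st.1 ++ [(st.2.1, st.2.2)], p, p)

theorem crGo_head_subst (ps : List Int) (s s' prev : Int) :
    ∃ b r, crGo s prev ps = (s, b) :: r ∧ crGo s' prev ps = (s', b) :: r := by
  induction ps generalizing prev with
  | nil => exact ⟨prev, [], rfl, rfl⟩
  | cons p ps ih =>
    by_cases h : p = prev + 1
    · simp only [crGo, if_pos h]; exact ih p
    · exact ⟨prev, crGo p p ps, by simp [crGo, h], by simp [crGo, h]⟩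

theorem foldA_eq_crGo (ps : List Int) (acc : List (Int × Int)) (s prev : Int) :
    (ps.foldl crStep (acc, s, prev)).1
      ++ [((ps.foldl crStep (acc, s, prev)).2.1, (ps.foldl crStep (acc, s, prev)).2.2)]
      = acc ++ crGo s prev ps := by
  induction ps generalizing acc s prev with
  | nil => simp [crGo]
  | cons p ps ih =>
    by_cases h : p = prev + 1 <;>
      simp only [List.foldl_cons, crStep, crGo, h, if_false, if_pos] <;>
      simp [ih, List.append_assoc]

theorem pyGroupBy_first (k : Int × Int → Int) (x : Int × Int) (xs : List (Int × Int)) :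
    ∃ t gs, pyGroupBy k (x :: xs) = (x :: t) :: gs := by
  simp only [pyGroupBy]
  rcases pyGroupBy k xs with _ | ⟨_ | ⟨y, t⟩, gs⟩
  · exact ⟨[], [], rfl⟩
  · exact ⟨[], gs, rfl⟩
  · by_cases h : k x = k y
    · exact ⟨y :: t, gs, by simp [h]⟩
    · exact ⟨[], (y :: t) :: gs, by simp [h]⟩

theorem groupBy_eq_crGo (ps : List Int) (p : Int) (n : Int) :
    (pyGroupBy (fun ix => ix.2 - ix.1) (PySem.List.enumerate (p :: ps) n)).map
      (fun g => let vals := g.map (·.2); (vals.headD 0, vals.getLastD 0)) = crGo p p ps := by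
  induction ps generalizing p n with
  | nil => simp [PySem.List.enumerate_cons, PySem.List.enumerate_nil, pyGroupBy, crGo]
  | cons q qs ih =>
    obtain ⟨t, gs, ht⟩ := pyGroupBy_first (fun ix => ix.2 - ix.1) (n + 1, q)
        (PySem.List.enumerate qs (n + 1 + 1))
    have ihq := ih q (n + 1)
    rw [PySem.List.enumerate_cons, ht] at ihq
    rw [PySem.List.enumerate_cons, PySem.List.enumerate_cons, pyGroupBy, ht]
    by_cases h : q = p + 1
    · have hk : ((n : Int), p).2 - ((n : Int), p).1 = ((n + 1 : Int), q).2 - ((n + 1 : Int), q).1 := by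
        simp only []; omega
      simp only [hk, crGo, if_pos h]
      obtain ⟨b, r, h1, h2⟩ := crGo_head_subst qs p q q
      rw [h2] at ihq
      rw [h1]
      simp only [List.map_cons, List.cons.injEq] at ihq ⊢
      obtain ⟨hhead, htail⟩ := ihq
      simp only [List.headD_cons, Prod.mk.injEq, List.getLastD_cons] at hhead ⊢
      simp only [if_true, List.map_cons, List.cons.injEq, List.headD_cons,
        List.getLastD_cons, Prod.mk.injEq]
      exact ⟨⟨trivial, hhead.2⟩, htail⟩
    · have hk : ¬ (((n : Int), p).2 - ((n : Int), p).1 = ((n + 1 : Int), q).2 - ((n + 1 : Int), q).1) := by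
        simp only []; omega
      simp only [if_neg hk, crGo, if_neg h]
      rw [← ihq]
      simp

-- ===== VERDICT (by name: the statement is the Claim_ definition above) =====
theorem contiguous_ranges_spec : Claim_equal_contiguous_ranges := by
  intro pos _
  unfold Spec_contiguous_ranges contiguous_ranges contiguous_ranges_alt
  cases pos with
  | nil => simp [PySem.List.enumerate_nil, pyGroupBy]
  | cons p ps =>
    show (ps.foldl crStep ([], p, p)).1
        ++ [((ps.foldl crStep ([], p, p)).2.1, (ps.foldl crStep ([], p, p)).2.2)]
      = _
    rw [foldA_eq_crGo ps [] p p, List.nil_append]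
    rw [show PySem.List.enumerate (p :: ps) = PySem.List.enumerate (p :: ps) 0 from rfl]
    rw [groupBy_eq_crGo ps p 0]
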